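-- pv_equiv track=rewrite | github.com/nicolefrumkin/Simple-Python-Cryptography-and-RSA-Breaks | q1.py | plaintext_score
-- ===== SOURCE A (Python) =====
-- def plaintext_score(plaintext: str) -> float:
--     """Scores a candidate plaintext string, higher means more likely."""
--     score = 0
--     valid = [' ', '?', '!', '"', '.', ',', ':', "'", '-','0','1', '2', '3', '4', '5', '6', '7', '8', '9', '\n']
--     common_letters = ['e','t','a','o','i','n','s','h','r','d']
--     for char in plaintext:
--         if 'a' <= char.lower() <= 'z' or char in valid:
--             score += 1
--         if char.lower() in common_letters:
--             score +=1
--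
--     return score
-- ===== SOURCE B (Python) =====
-- def plaintext_score(plaintext: str) -> float:
--     """Scores a candidate plaintext string, higher means more likely."""
--     counts = {}
--     for char in plaintext:
--         counts[char] = counts.get(char, 0) + 1
--     valid = [' ', '?', '!', '"', '.', ',', ':', "'", '-','0','1', '2', '3', '4', '5', '6', '7', '8', '9', '\n']
--     common_letters = ['e','t','a','o','i','n','s','h','r','d']
--     score = 0
--     for char, n in counts.items():
--         if 'a' <= char.lower() <= 'z' or char in valid:
--             score += n
--         if char.lower() in common_letters:
--             score += n
--     return score
-- ===== Notes on version B (the rewrite author's own statement) =====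
-- stated objective: faster
-- what changed: B builds a character-frequency table in one pass and then scores each DISTINCT character once, weighted by its count, instead of re-testing every character occurrence against the valid/common lists.
import Mathlib
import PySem

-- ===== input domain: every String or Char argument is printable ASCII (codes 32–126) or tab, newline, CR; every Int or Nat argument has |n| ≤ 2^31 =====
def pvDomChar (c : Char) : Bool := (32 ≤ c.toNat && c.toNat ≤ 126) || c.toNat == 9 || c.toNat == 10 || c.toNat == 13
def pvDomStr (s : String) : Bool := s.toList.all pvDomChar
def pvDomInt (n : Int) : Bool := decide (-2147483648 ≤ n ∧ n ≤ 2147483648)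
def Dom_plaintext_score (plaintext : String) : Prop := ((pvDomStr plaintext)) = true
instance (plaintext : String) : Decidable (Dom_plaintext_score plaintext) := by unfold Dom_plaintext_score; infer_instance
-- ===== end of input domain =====

-- B replaces A's per-occurrence scan with a frequency table scored once per distinct character (constant-factor faster: list membership tests run per distinct char, not per occurrence).


-- ===== PORT A =====
def pvValid : List Char := [' ', '?', '!', '"', '.', ',', ':', '\'', '-', '0', '1', '2', '3', '4', '5', '6', '7', '8', '9', '\n']
def pvCommon : List Char := ['e', 't', 'a', 'o', 'i', 'n', 's', 'h', 'r', 'd']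

-- 'a' <= char.lower() <= 'z' on a one-character string is the character comparison
-- 'a' ≤ lowerChar c ∧ lowerChar c ≤ 'z' (PySem.Chars.lowerChar is exact on the ASCII domain).
def plaintext_score (plaintext : String) : Int :=
  plaintext.toList.foldl (fun score c =>
    let score := if ('a' ≤ PySem.Chars.lowerChar c ∧ PySem.Chars.lowerChar c ≤ 'z') ∨ c ∈ pvValid
                 then score + 1 else score
    if PySem.Chars.lowerChar c ∈ pvCommon then score + 1 else score) 0

-- ===== PORT B =====
def plaintext_score_alt (plaintext : String) : Int :=
  let counts := plaintext.toList.foldl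
    (fun d c => d.insert c (d.getD c 0 + 1)) (PySem.Dict.empty (κ := Char) (ν := Int))
  counts.items.foldl (fun score p =>
    let score := if ('a' ≤ PySem.Chars.lowerChar p.1 ∧ PySem.Chars.lowerChar p.1 ≤ 'z') ∨ p.1 ∈ pvValid
                 then score + p.2 else score
    if PySem.Chars.lowerChar p.1 ∈ pvCommon then score + p.2 else score) 0

-- ===== PRECONDITION & SPEC =====
def Spec_plaintext_score (plaintext : String) (out : Int) : Prop := out = plaintext_score_alt plaintext
instance (plaintext : String) (out : Int) : Decidable (Spec_plaintext_score plaintext out) := by unfold Spec_plaintext_score; infer_instance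

-- ===== CLAIM (what is proved, stated in full; the proofs are below) =====
def Claim_equal_plaintext_score : Prop := ∀ (plaintext : String), Dom_plaintext_score plaintext → Spec_plaintext_score plaintext (plaintext_score plaintext)

-- ===== LEMMAS AND PROOFS =====

-- per-character score A awards (0, 1 or 2)
def pvG (c : Char) : Int :=
  (if ('a' ≤ PySem.Chars.lowerChar c ∧ PySem.Chars.lowerChar c ≤ 'z') ∨ c ∈ pvValid then 1 else 0)
  + (if PySem.Chars.lowerChar c ∈ pvCommon then 1 else 0)

theorem pvA_foldl (xs : List Char) (s : Int) :
    xs.foldl (fun score c =>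
      if PySem.Chars.lowerChar c ∈ pvCommon
      then (if ('a' ≤ PySem.Chars.lowerChar c ∧ PySem.Chars.lowerChar c ≤ 'z') ∨ c ∈ pvValid
            then score + 1 else score) + 1
      else (if ('a' ≤ PySem.Chars.lowerChar c ∧ PySem.Chars.lowerChar c ≤ 'z') ∨ c ∈ pvValid
            then score + 1 else score)) s
    = s + (xs.map pvG).sum := by
  induction xs generalizing s with
  | nil => simp
  | cons x xs ih =>
    simp only [List.foldl_cons, List.map_cons, List.sum_cons, ih, pvG]
    split_ifs <;> ring

theorem pvB_foldl (ps : List (Char × Int)) (s : Int) :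
    ps.foldl (fun score p =>
      if PySem.Chars.lowerChar p.1 ∈ pvCommon
      then (if ('a' ≤ PySem.Chars.lowerChar p.1 ∧ PySem.Chars.lowerChar p.1 ≤ 'z') ∨ p.1 ∈ pvValid
            then score + p.2 else score) + p.2
      else (if ('a' ≤ PySem.Chars.lowerChar p.1 ∧ PySem.Chars.lowerChar p.1 ≤ 'z') ∨ p.1 ∈ pvValid
            then score + p.2 else score)) s
    = s + (ps.map (fun p => p.2 * pvG p.1)).sum := by
  induction ps generalizing s with
  | nil => simp
  | cons p ps ih =>
    simp only [List.foldl_cons, List.map_cons, List.sum_cons, ih, pvG]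
    split_ifs <;> ring

-- sum over a nodup list of (if k = x then v else 0) with x a member is v
theorem pvSum_ite (ks : List Char) (x : Char) (v : Int) (hnd : ks.Nodup) (hx : x ∈ ks) :
    (ks.map (fun k => if k = x then v else 0)).sum = v := by
  induction ks with
  | nil => cases hx
  | cons b ks ih =>
    rcases List.mem_cons.mp hx with h | h
    · subst h
      have h0 : (ks.map (fun k => if k = x then v else 0)).sum = 0 := by
        apply List.sum_eq_zero
        intro y hy
        obtain ⟨k, hk, rfl⟩ := List.mem_map.mp hy
        have hne : k ≠ x := fun e => (List.nodup_cons.mp hnd).1 (e ▸ hk)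
        simp [hne]
      simp [h0]
    · have hbx : b ≠ x := fun e => (List.nodup_cons.mp hnd).1 (e ▸ h)
      simp [hbx, ih (List.nodup_cons.mp hnd).2 h]

-- counting lemma: scoring distinct characters weighted by multiplicity equals scoring every occurrence
theorem pvCount_sum (xs ks : List Char) (hnd : ks.Nodup) (hsub : ∀ x ∈ xs, x ∈ ks) :
    (ks.map (fun k => (xs.count k : Int) * pvG k)).sum = (xs.map pvG).sum := by
  induction xs with
  | nil => simp
  | cons x xs ih =>
    have step : ∀ k : Char, ((x :: xs).count k : Int) * pvG k
        = (xs.count k : Int) * pvG k + (if k = x then pvG x else 0) := by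
      intro k
      by_cases h : k = x
      · subst h; simp [List.count_cons_self]; ring
      · have hxk : ¬x = k := fun e => h e.symm
        simp [h, hxk]
    calc (ks.map (fun k => ((x :: xs).count k : Int) * pvG k)).sum
        = (ks.map (fun k => (xs.count k : Int) * pvG k + (if k = x then pvG x else 0))).sum := by
          simp only [step]
      _ = (ks.map (fun k => (xs.count k : Int) * pvG k)).sum
          + (ks.map (fun k => if k = x then pvG x else 0)).sum := by
          rw [← List.sum_map_add]
      _ = (xs.map pvG).sum + pvG x := by
          rw [ih (fun y hy => hsub y (List.mem_cons_of_mem _ hy)),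
              pvSum_ite ks x (pvG x) hnd (hsub x List.mem_cons_self)]
      _ = ((x :: xs).map pvG).sum := by simp [List.map_cons]; ring

-- ===== VERDICT (by name: the statement is the Claim_ definition above) =====
theorem plaintext_score_spec : Claim_equal_plaintext_score := by
  intro plaintext _
  unfold Spec_plaintext_score plaintext_score plaintext_score_alt
  simp only [PySem.Dict.foldl_insert_getD_add_one_eq_counter, PySem.Dict.items_counter]
  rw [pvA_foldl, pvB_foldl, List.map_map]
  have := pvCount_sum plaintext.toList (PySem.Set.ofList plaintext.toList)
    (PySem.Set.nodup_ofList _) (fun x hx => (PySem.Set.mem_ofList _ _).mpr hx)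
  simpa [Function.comp] using this.symm
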